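-- pv_equiv track=rewrite | github.com/Floretion-Inquisitor/floretions | lib/floretion_utils/fibops.py | _format_recurrence_en
-- ===== SOURCE A (Python) =====
-- from typing import Sequence, List, Dict, Any, Tuple, Optional
--
-- def _format_recurrence_en(order: int, coeffs: Sequence[int]) -> str:
--     """
--     Formatta una ricorrenza lineare in inglese, ad es.:
--
--         a_n = 3·a_{n-1} - 2·a_{n-2} + a_{n-3}
--
--     Testo in inglese perché viene mostrato nel box delle sequenze sul sito.
--     """
--     parts: list[str] = []
--     for j, c in enumerate(coeffs, start=1):
--         if c == 0:
--             continue
--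
--         term = f"a_(n-{j})"
--
--         if not parts:
--             # primo termine: gestiamo il segno direttamente
--             if c == 1:
--                 parts.append(term)
--             elif c == -1:
--                 parts.append(f"-{term}")
--             else:
--                 parts.append(f"{c}·{term}")
--         else:
--             if c > 0:
--                 if c == 1:
--                     parts.append(f"+ {term}")
--                 else:
--                     parts.append(f"+ {c}·{term}")
--             else:
--                 cc = -c
--                 if cc == 1:
--                     parts.append(f"- {term}")
--                 else:
--                     parts.append(f"- {cc}·{term}")
--
--     if not parts:
--         rhs = "0"
--     else:
--         rhs = " ".join(parts)
--
--     return f"a_n = {rhs}"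
-- ===== SOURCE B (Python) =====
-- from typing import Sequence
--
-- def _format_recurrence_en(order: int, coeffs: Sequence[int]) -> str:
--     # Staged decomposition: skip leading zeros, render the head term once with
--     # its tight sign, then concatenate one uniform " sign mag·term" piece per
--     # remaining non-zero coefficient directly onto a string -- no parts list,
--     # no join, no state-dependent first-term branch.
--     return "a_n = " + _rhs(1, list(coeffs))
--
-- def _rhs(j: int, cs: list) -> str:
--     while cs and cs[0] == 0:
--         j += 1
--         cs = cs[1:]
--     if not cs:
--         return "0"
--     return _head(j, cs[0]) + _tail(j + 1, cs[1:])
--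
-- def _head(j: int, c: int) -> str:
--     if abs(c) == 1:
--         return ("-" if c < 0 else "") + f"a_(n-{j})"
--     return f"{c}\u00b7a_(n-{j})"
--
-- def _tail(j: int, cs: list) -> str:
--     s = ""
--     for c in cs:
--         if c != 0:
--             sign = "+" if c > 0 else "-"
--             mag = "" if abs(c) == 1 else f"{abs(c)}\u00b7"
--             s += f" {sign} {mag}a_(n-{j})"
--         j += 1
--     return s
-- ===== Notes on version B (the rewrite author's own statement) =====
-- stated objective: alternative
-- what changed: B replaces A's single stateful loop (parts list with a first-term special case, then ' '.join) by a staged decomposition: skip the leading zeros, render the head term once with its tight sign, then concatenate one uniform ' sign mag·term' piece per remaining non-zero coefficient directly onto the result string — no parts list, no join, no state-dependent branch.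
import Mathlib
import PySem

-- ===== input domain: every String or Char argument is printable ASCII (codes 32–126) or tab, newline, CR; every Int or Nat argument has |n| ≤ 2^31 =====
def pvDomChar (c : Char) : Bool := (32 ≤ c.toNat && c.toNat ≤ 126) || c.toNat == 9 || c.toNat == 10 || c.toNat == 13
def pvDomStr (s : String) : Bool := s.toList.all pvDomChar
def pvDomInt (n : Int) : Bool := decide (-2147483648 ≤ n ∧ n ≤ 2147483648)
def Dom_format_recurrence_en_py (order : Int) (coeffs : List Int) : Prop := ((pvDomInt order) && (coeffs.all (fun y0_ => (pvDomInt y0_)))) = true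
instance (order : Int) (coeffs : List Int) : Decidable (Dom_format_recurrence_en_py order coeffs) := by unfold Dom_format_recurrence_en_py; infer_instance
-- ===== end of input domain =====

-- B builds the string by direct structural recursion (skip zeros, head term, then tail
-- pieces concatenated), with no parts list and no join; objective: alternative (same cost).

-- ===== PORT A =====
-- f"a_(n-{j})"
def pvA_term (j : Int) : String := "a_(n-" ++ PySem.Int.toStr j ++ ")"

-- the for-loop of A: j is the enumerate counter (start=1), parts the accumulator
def pvA_loop (j : Int) (cs : List Int) (parts : List String) : List String :=
  match cs with
  | [] => parts
  | c :: rest =>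
    if c = 0 then pvA_loop (j + 1) rest parts
    else
      let term := pvA_term j
      let part :=
        if parts = [] then
          if c = 1 then term
          else if c = -1 then "-" ++ term
          else PySem.Int.toStr c ++ "·" ++ term
        else if c > 0 then
          if c = 1 then "+ " ++ term else "+ " ++ PySem.Int.toStr c ++ "·" ++ term
        else
          if -c = 1 then "- " ++ term else "- " ++ PySem.Int.toStr (-c) ++ "·" ++ term
      pvA_loop (j + 1) rest (parts ++ [part])

def format_recurrence_en_py (_order : Int) (coeffs : List Int) : String :=
  let parts := pvA_loop 1 coeffs []
  let rhs := if parts = [] then "0" else PySem.Str.join " " parts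
  "a_n = " ++ rhs

-- ===== PORT B =====
-- _head: the leading term, sign rendered tight
def pvB_head (j c : Int) : String :=
  if |c| = 1 then (if c < 0 then "-" else "") ++ ("a_(n-" ++ PySem.Int.toStr j ++ ")")
  else PySem.Int.toStr c ++ "·a_(n-" ++ PySem.Int.toStr j ++ ")"

-- _tail: the for-loop, concatenating one " sign mag·term" piece per non-zero coeff onto s
def pvB_tail (j : Int) (cs : List Int) (s : String) : String :=
  match cs with
  | [] => s
  | c :: rest =>
    if c = 0 then pvB_tail (j + 1) rest s
    else
      pvB_tail (j + 1) rest
        (s ++ (" " ++ (if c > 0 then "+" else "-") ++ " " ++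
          (if |c| = 1 then "" else PySem.Int.toStr |c| ++ "·") ++
          "a_(n-" ++ PySem.Int.toStr j ++ ")"))

-- _rhs: skip leading zeros, then head + tail; "0" if no non-zero coefficient
def pvB_rhs (j : Int) (cs : List Int) : String :=
  match cs with
  | [] => "0"
  | c :: rest => if c = 0 then pvB_rhs (j + 1) rest else pvB_head j c ++ pvB_tail (j + 1) rest ""

def format_recurrence_en_py_alt (_order : Int) (coeffs : List Int) : String :=
  "a_n = " ++ pvB_rhs 1 coeffs

-- ===== PRECONDITION & SPEC =====
def Spec_format_recurrence_en_py (order : Int) (coeffs : List Int) (out : String) : Prop := out = format_recurrence_en_py_alt order coeffs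
instance (order : Int) (coeffs : List Int) (out : String) : Decidable (Spec_format_recurrence_en_py order coeffs out) := by unfold Spec_format_recurrence_en_py; infer_instance

-- ===== CLAIM (what is proved, stated in full; the proofs are below) =====
def Claim_equal_format_recurrence_en_py : Prop := ∀ (order : Int) (coeffs : List Int), Dom_format_recurrence_en_py order coeffs → Spec_format_recurrence_en_py order coeffs (format_recurrence_en_py order coeffs)

-- ===== LEMMAS AND PROOFS =====

-- string equality via toList
theorem pv_str_ext {a b : String} (h : a.toList = b.toList) : a = b := String.toList_inj.mp h

-- proof-side foldr form of B's tail loop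
def pvB_tailR (j : Int) (cs : List Int) : String :=
  match cs with
  | [] => ""
  | c :: rest =>
    if c = 0 then pvB_tailR (j + 1) rest
    else
      (" " ++ (if c > 0 then "+" else "-") ++ " " ++
        (if |c| = 1 then "" else PySem.Int.toStr |c| ++ "·") ++
        "a_(n-" ++ PySem.Int.toStr j ++ ")") ++ pvB_tailR (j + 1) rest

theorem pv_tail_acc (cs : List Int) : ∀ (j : Int) (s : String),
    pvB_tail j cs s = s ++ pvB_tailR j cs := by
  induction cs with
  | nil =>
    intro j s
    apply pv_str_ext
    simp [pvB_tail, pvB_tailR]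
  | cons c rest ih =>
    intro j s
    by_cases hc : c = 0
    · simp [pvB_tail, pvB_tailR, hc, ih]
    · rw [pvB_tail, pvB_tailR]
      simp only [hc, reduceIte]
      rw [ih]
      apply pv_str_ext
      simp [String.toList_append]

-- A's interior part for one non-zero coefficient (the else-branch of A's loop)
def pvIntPart (j c : Int) : String :=
  if c > 0 then
    if c = 1 then "+ " ++ pvA_term j else "+ " ++ PySem.Int.toStr c ++ "·" ++ pvA_term j
  else
    if -c = 1 then "- " ++ pvA_term j else "- " ++ PySem.Int.toStr (-c) ++ "·" ++ pvA_term j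

-- list of A's interior parts for a suffix of coefficients
def pvIntParts (j : Int) (cs : List Int) : List String :=
  match cs with
  | [] => []
  | c :: rest => if c = 0 then pvIntParts (j + 1) rest else pvIntPart j c :: pvIntParts (j + 1) rest

-- how " ".join renders a space-prefixed tail
def pvChunksChars (ps : List String) : List Char := (ps.map (fun q => ' ' :: q.toList)).flatten

theorem pv_join_chars (ps : List String) : ∀ p : String,
    (PySem.Str.join " " (p :: ps)).toList = p.toList ++ pvChunksChars ps := by
  induction ps with
  | nil => intro p; simp [pvChunksChars, PySem.Chars.join_singleton]
  | cons q qs ih =>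
    intro p
    simp only [PySem.Str.toList_join, List.map_cons, PySem.Chars.join_cons_cons] at *
    simp [pvChunksChars] at ih ⊢
    simp [ih q]

-- with a nonempty accumulator, A's loop appends exactly the interior parts
theorem pv_loop_nonempty (cs : List Int) : ∀ (j : Int) (p : String) (ps : List String),
    pvA_loop j cs (p :: ps) = (p :: ps) ++ pvIntParts j cs := by
  induction cs with
  | nil => intro j p ps; simp [pvA_loop, pvIntParts]
  | cons c rest ih =>
    intro j p ps
    by_cases hc : c = 0
    · simp [pvA_loop, pvIntParts, hc, ih]
    · rw [pvA_loop, pvIntParts]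
      simp only [hc, reduceIte]
      have hne : (p :: ps : List String) ≠ [] := by simp
      rw [if_neg hne]
      show pvA_loop (j + 1) rest (p :: (ps ++ [pvIntPart j c])) = _
      rw [ih (j + 1) p (ps ++ [pvIntPart j c])]
      simp

-- B's tail piece for one non-zero coefficient is ' ' followed by A's interior part
theorem pv_piece_eq (j c : Int) (hc : c ≠ 0) :
    (" " ++ (if c > 0 then "+" else "-") ++ " " ++
      (if |c| = 1 then "" else PySem.Int.toStr |c| ++ "·") ++
      "a_(n-" ++ PySem.Int.toStr j ++ ")").toList = ' ' :: (pvIntPart j c).toList := by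
  by_cases hp : c > 0
  · have habs : |c| = c := abs_of_pos hp
    by_cases h1 : c = 1
    · simp [pvIntPart, pvA_term, h1, String.toList_append]
    · have h1' : ¬ |c| = 1 := by rw [habs]; exact h1
      simp [pvIntPart, pvA_term, hp, h1, habs, String.toList_append]
  · have hneg : c < 0 := lt_of_le_of_ne (not_lt.mp hp) hc
    have habs : |c| = -c := abs_of_neg hneg
    by_cases h1 : -c = 1
    · have h1' : |c| = 1 := by rw [habs]; exact h1
      simp [pvIntPart, pvA_term, hp, h1, h1', String.toList_append]
    · have h1' : ¬ |c| = 1 := by rw [habs]; exact h1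
      simp [pvIntPart, pvA_term, hp, h1, habs, String.toList_append]

-- B's tail renders the interior parts exactly as " ".join's tail does
theorem pv_tail_chars (cs : List Int) : ∀ j : Int,
    (pvB_tailR j cs).toList = pvChunksChars (pvIntParts j cs) := by
  induction cs with
  | nil => intro j; simp [pvB_tailR, pvIntParts, pvChunksChars]
  | cons c rest ih =>
    intro j
    by_cases hc : c = 0
    · simp [pvB_tailR, pvIntParts, hc, ih]
    · rw [pvB_tailR, pvIntParts]
      simp only [hc, reduceIte]
      rw [String.toList_append, pv_piece_eq j c hc, ih (j + 1)]
      simp [pvChunksChars]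

-- B's head equals A's first-term rendering
theorem pv_head_eq (j c : Int) (_hc : c ≠ 0) :
    pvB_head j c =
      (if c = 1 then pvA_term j
       else if c = -1 then "-" ++ pvA_term j
       else PySem.Int.toStr c ++ "·" ++ pvA_term j) := by
  have habs : |c| = 1 ↔ c = 1 ∨ c = -1 := abs_eq one_pos.le
  apply pv_str_ext
  by_cases h1 : c = 1
  · simp [pvB_head, pvA_term, h1]
  · by_cases h2 : c = -1
    · simp [pvB_head, pvA_term, h2, String.toList_append]
    · have h3 : ¬ |c| = 1 := by rw [habs]; tauto
      simp [pvB_head, pvA_term, h1, h2, h3, String.toList_append]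

-- the first non-zero coefficient becomes A's first part, the rest interior parts
theorem pv_first (rest : List Int) (j c : Int) (hc : c ≠ 0) :
    pvA_loop j (c :: rest) [] =
      (if c = 1 then pvA_term j
       else if c = -1 then "-" ++ pvA_term j
       else PySem.Int.toStr c ++ "·" ++ pvA_term j) :: pvIntParts (j + 1) rest := by
  rw [pvA_loop]
  simp only [hc, reduceIte, List.nil_append]
  exact pv_loop_nonempty rest (j + 1) _ []

-- the two right-hand sides agree for every starting index
theorem pv_main (cs : List Int) : ∀ j : Int,
    (if pvA_loop j cs [] = [] then "0" else PySem.Str.join " " (pvA_loop j cs [])) = pvB_rhs j cs := by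
  induction cs with
  | nil => intro j; simp [pvA_loop, pvB_rhs]
  | cons c rest ih =>
    intro j
    by_cases hc : c = 0
    · rw [pvA_loop, pvB_rhs]
      simp only [hc, reduceIte]
      exact ih (j + 1)
    · rw [pv_first rest j c hc, pvB_rhs]
      simp only [hc, reduceIte]
      rw [if_neg (by simp)]
      apply pv_str_ext
      rw [pv_tail_acc rest (j + 1) ""]
      have he : ("" : String) ++ pvB_tailR (j + 1) rest = pvB_tailR (j + 1) rest := by
        apply pv_str_ext; simp
      rw [he, pv_join_chars, String.toList_append, pv_tail_chars, pv_head_eq j c hc]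

-- ===== VERDICT (by name: the statement is the Claim_ definition above) =====
theorem format_recurrence_en_py_spec : Claim_equal_format_recurrence_en_py := by
  intro order coeffs _
  unfold Spec_format_recurrence_en_py format_recurrence_en_py format_recurrence_en_py_alt
  exact congrArg (fun s => "a_n = " ++ s) (pv_main coeffs 1)
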